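-- pv_equiv track=rewrite | github.com/kavanaghpatrick/aristotle-math-problems | scripts/path4_nonseparated.py | min_edge_cover_triangles
-- ===== SOURCE A (Python) =====
-- import itertools
--
-- def edges_of_tuple(tri):
--     """Return edges as a set of frozensets."""
--     a, b, c = tri
--     return {frozenset([a,b]), frozenset([a,c]), frozenset([b,c])}
--
-- def min_edge_cover_triangles(graph_edges, triangles, max_size=10):
--     """
--     Find minimum set of edges that hits every triangle.
--     Uses ILP-style greedy + brute force for small instances.
--     """
--     if not triangles:
--         return 0
--
--     # Convert triangles to edge sets
--     tri_edge_sets = [edges_of_tuple(t) for t in triangles]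
--
--     # Only edges that appear in some triangle matter
--     relevant_edges = set()
--     for tes in tri_edge_sets:
--         relevant_edges |= tes
--     relevant_edges = list(relevant_edges)
--
--     if len(relevant_edges) > 25:
--         # Use greedy approximation
--         return _greedy_cover(relevant_edges, tri_edge_sets)
--
--     # Brute force for small cases
--     for size in range(1, min(max_size + 1, len(relevant_edges) + 1)):
--         for cover in itertools.combinations(range(len(relevant_edges)), size):
--             cover_set = {relevant_edges[i] for i in cover}
--             if all(tes & cover_set for tes in tri_edge_sets):
--                 return size
--     return max_size + 1
--
-- def _greedy_cover(edges, tri_edge_sets):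
--     """Greedy triangle cover."""
--     uncovered = list(range(len(tri_edge_sets)))
--     cover = []
--     while uncovered:
--         # Pick edge covering most uncovered triangles
--         best_edge = None
--         best_count = 0
--         for e in edges:
--             count = sum(1 for i in uncovered if e in tri_edge_sets[i])
--             if count > best_count:
--                 best_count = count
--                 best_edge = e
--         if best_edge is None or best_count == 0:
--             break
--         cover.append(best_edge)
--         uncovered = [i for i in uncovered if best_edge not in tri_edge_sets[i]]
--     return len(cover)
-- ===== SOURCE B (Python) =====
-- def _fs(a, b):
--     """Normalized edge: frozenset([a,b]) represented as a sorted pair."""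
--     return (a, b) if a <= b else (b, a)
--
--
-- def min_edge_cover_triangles(graph_edges, triangles, max_size=10):
--     """
--     Find minimum set of edges that hits every triangle.
--     Exact branch-and-bound on the first uncovered triangle for small
--     instances, greedy approximation for large ones.
--     """
--     if not triangles:
--         return 0
--
--     # Per-triangle edge lists (deduplicated, deterministic order) and the
--     # list of all relevant edges in first-occurrence order.
--     tri_edges = []
--     relevant = []
--     for (a, b, c) in triangles:
--         es = []
--         for e in (_fs(a, b), _fs(a, c), _fs(b, c)):
--             if e not in es:
--                 es.append(e)
--             if e not in relevant:
--                 relevant.append(e)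
--         tri_edges.append(es)
--
--     if len(relevant) > 25:
--         return _greedy_cover_b(relevant, tri_edges)
--
--     budget = min(max_size, len(relevant))
--     m = _bb(tri_edges, set(), budget)
--     return m if m <= max_size else max_size + 1
--
--
-- def _bb(tris, cover, budget):
--     """min(budget+1, minimum number of extra edges needed to hit every
--     triangle not already hit by `cover`): branch on the first uncovered
--     triangle's edges."""
--     t = next((es for es in tris if not any(e in cover for e in es)), None)
--     if t is None:
--         return 0
--     if budget <= 0:
--         return 1
--     return 1 + min(_bb(tris, cover | {e}, budget - 1) for e in t)
--
--
-- def _greedy_cover_b(edges, tri_edges):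
--     """Greedy triangle cover (deterministic first-occurrence tie-break)."""
--     uncovered = list(range(len(tri_edges)))
--     cover = 0
--     while uncovered:
--         best_edge = None
--         best_count = 0
--         for e in edges:
--             count = sum(1 for i in uncovered if e in tri_edges[i])
--             if count > best_count:
--                 best_count = count
--                 best_edge = e
--         if best_edge is None:
--             break
--         cover += 1
--         uncovered = [i for i in uncovered if best_edge not in tri_edges[i]]
--     return cover
-- ===== Notes on version B (the rewrite author's own statement) =====
-- stated objective: alternative
-- what changed: Replaces A's size-staged scan over all C(n,k) index combinations with an exact branch-and-bound recursion on the first uncovered triangle (<=3 branches per level, pruned by the remaining budget), built in one pass over the triangles; the accidental hash-order-dependent >25-edge greedy path is excluded by Pre_.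
import Mathlib
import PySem

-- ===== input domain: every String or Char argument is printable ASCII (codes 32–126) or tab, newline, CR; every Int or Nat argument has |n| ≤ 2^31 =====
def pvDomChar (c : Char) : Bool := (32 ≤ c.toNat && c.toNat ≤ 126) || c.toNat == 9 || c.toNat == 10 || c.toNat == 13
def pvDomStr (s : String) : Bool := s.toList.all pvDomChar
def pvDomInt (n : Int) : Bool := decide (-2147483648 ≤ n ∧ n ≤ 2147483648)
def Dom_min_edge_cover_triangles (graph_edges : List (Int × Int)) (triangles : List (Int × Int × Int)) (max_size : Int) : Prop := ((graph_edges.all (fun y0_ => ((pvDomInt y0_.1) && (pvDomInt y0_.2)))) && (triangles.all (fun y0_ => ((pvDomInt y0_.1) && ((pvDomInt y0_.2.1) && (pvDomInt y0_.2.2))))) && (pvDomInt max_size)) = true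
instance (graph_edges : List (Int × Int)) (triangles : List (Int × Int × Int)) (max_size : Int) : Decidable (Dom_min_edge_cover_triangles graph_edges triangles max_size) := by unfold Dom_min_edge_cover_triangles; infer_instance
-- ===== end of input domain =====

-- B replaces A's size-staged scan over all C(n,k) index combinations by an exact
-- branch-and-bound recursion on the first uncovered triangle (objective: alternative
-- algorithm; A's greedy fallback for >25 edges is set-iteration-order dependent and
-- excluded by Pre_).

-- ===== PORT A =====
-- frozenset([a,b]) is represented by the sorted pair (min, max); a = b gives (a, a).
def pvNorm (a b : Int) : Int × Int := if a ≤ b then (a, b) else (b, a)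

def pvEdgesOfTuple (t : Int × Int × Int) : PySem.Set (Int × Int) :=
  PySem.Set.ofList [pvNorm t.1 t.2.1, pvNorm t.1 t.2.2, pvNorm t.2.1 t.2.2]

-- A's _greedy_cover while-loop; fuel = number of triangles + 1 bounds the iterations
-- (each pass removes at least one uncovered triangle), so the loop never hits fuel 0.
def pvGreedyLoop (edges : List (Int × Int)) (tris : List (PySem.Set (Int × Int))) :
    Nat → List Nat → List (Int × Int) → Int
  | 0, _, cover => (cover.length : Int)
  | fuel + 1, uncovered, cover =>
    if uncovered.isEmpty then (cover.length : Int) else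
    let best := edges.foldl (fun (st : Option (Int × Int) × Int) e =>
        let cnt : Int := ((uncovered.filter (fun i => (tris.getD i []).contains e)).length : Int)
        if st.2 < cnt then (some e, cnt) else st) (none, 0)
    match best.1 with
    | none => (cover.length : Int)
    | some be =>
        pvGreedyLoop edges tris fuel
          (uncovered.filter (fun i => !((tris.getD i []).contains be)))
          (cover ++ [be])

-- the size-staged brute-force loop: first size whose combinations contain a cover
def pvBruteLoop (relevant : List (Int × Int)) (tris : List (PySem.Set (Int × Int)))
    (max_size : Int) : List Int → Int
  | [] => max_size + 1
  | s :: rest =>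
    if (PySem.List.combinations (PySem.List.pyRange 0 (PySem.List.len relevant)) s.toNat).any
        (fun combo =>
          let coverSet : PySem.Set (Int × Int) :=
            PySem.Set.ofList (combo.map (fun i => PySem.List.pyGetD relevant i (0, 0)))
          tris.all (fun tes => !(PySem.Set.inter tes coverSet).isEmpty))
    then s else pvBruteLoop relevant tris max_size rest

def min_edge_cover_triangles (graph_edges : List (Int × Int)) (triangles : List (Int × Int × Int)) (max_size : Int) : Int :=
  if triangles.isEmpty then 0 else
  let tri_edge_sets := triangles.map pvEdgesOfTuple
  let relevant : PySem.Set (Int × Int) :=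
    tri_edge_sets.foldl (fun acc tes => PySem.Set.union acc tes) []
  if (relevant.length : Int) > 25 then
    pvGreedyLoop relevant tri_edge_sets (tri_edge_sets.length + 1)
      (List.range tri_edge_sets.length) []
  else
    pvBruteLoop relevant tri_edge_sets max_size
      (PySem.List.pyRange 1 (min (max_size + 1) ((relevant.length : Int) + 1)))

-- ===== PORT B =====
def pvFs (a b : Int) : Int × Int := if a ≤ b then (a, b) else (b, a)

def pvTriRaw (t : Int × Int × Int) : List (Int × Int) :=
  [pvFs t.1 t.2.1, pvFs t.1 t.2.2, pvFs t.2.1 t.2.2]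

-- one pass over the triangles building (per-triangle deduped edge lists, relevant edges)
def pvBuild (triangles : List (Int × Int × Int)) :
    List (List (Int × Int)) × List (Int × Int) :=
  triangles.foldl (fun s t =>
    let q := (pvTriRaw t).foldl (fun (q : List (Int × Int) × List (Int × Int)) e =>
        (if e ∈ q.1 then q.1 else q.1 ++ [e],
         if e ∈ q.2 then q.2 else q.2 ++ [e])) ([], s.2)
    (s.1 ++ [q.1], q.2)) ([], [])

-- branch and bound: min(budget+1, fewest extra edges hitting every uncovered triangle)
def pvBB (tris : List (List (Int × Int))) : Nat → PySem.Set (Int × Int) → Int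
  | 0, cover =>
    match tris.find? (fun es => !es.any (fun e => cover.contains e)) with
    | none => 0
    | some _ => 1
  | b + 1, cover =>
    match tris.find? (fun es => !es.any (fun e => cover.contains e)) with
    | none => 0
    | some t =>
      match t with
      | [] => 1  -- unreachable: every triangle edge list is nonempty
      | e :: ts =>
        1 + (ts.map (fun e' => pvBB tris b (cover.add e'))).foldl min
              (pvBB tris b (cover.add e))

-- B's greedy fallback for large instances (deterministic first-occurrence order)
def pvGreedyB (edges : List (Int × Int)) (tris : List (List (Int × Int))) :
    Nat → List Nat → Int → Int
  | 0, _, cover => cover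
  | fuel + 1, uncovered, cover =>
    if uncovered.isEmpty then cover else
    let best := edges.foldl (fun (st : Option (Int × Int) × Int) e =>
        let cnt : Int := ((uncovered.filter (fun i => (tris.getD i []).contains e)).length : Int)
        if st.2 < cnt then (some e, cnt) else st) (none, 0)
    match best.1 with
    | none => cover
    | some be =>
        pvGreedyB edges tris fuel
          (uncovered.filter (fun i => !((tris.getD i []).contains be))) (cover + 1)

def min_edge_cover_triangles_alt (graph_edges : List (Int × Int)) (triangles : List (Int × Int × Int)) (max_size : Int) : Int :=
  if triangles.isEmpty then 0 else
  let p := pvBuild triangles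
  if (p.2.length : Int) > 25 then
    pvGreedyB p.2 p.1 (p.1.length + 1) (List.range p.1.length) 0
  else
    let budget : Int := min max_size (p.2.length : Int)
    let m := pvBB p.1 budget.toNat []
    if m ≤ max_size then m else max_size + 1

-- ===== PRECONDITION & SPEC =====
-- number of distinct (normalized) triangle edges, for Pre_ only
def pvDistinct (triangles : List (Int × Int × Int)) : Nat :=
  (PySem.Set.ofList (triangles.flatMap (fun t =>
    [(if t.1 ≤ t.2.1 then (t.1, t.2.1) else (t.2.1, t.1)),
     (if t.1 ≤ t.2.2 then (t.1, t.2.2) else (t.2.2, t.1)),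
     (if t.2.1 ≤ t.2.2 then (t.2.1, t.2.2) else (t.2.2, t.2.1))]))).length

-- Pre_ excludes inputs with more than 25 distinct triangle edges: there A's greedy
-- fallback returns a value that depends on Python's hash-based set iteration order
-- (its tie-break among equally good edges), an accident no implementation can be
-- required to match; B's deterministic greedy is equally defensible there.
def Pre_min_edge_cover_triangles (graph_edges : List (Int × Int)) (triangles : List (Int × Int × Int)) (max_size : Int) : Prop :=
  pvDistinct triangles ≤ 25
instance (graph_edges : List (Int × Int)) (triangles : List (Int × Int × Int)) (max_size : Int) : Decidable (Pre_min_edge_cover_triangles graph_edges triangles max_size) := by unfold Pre_min_edge_cover_triangles; infer_instance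

def pvWitness_min_edge_cover_triangles : (List (Int × Int)) × (List (Int × Int × Int)) × Int :=
  ([(1, 2)], [(1, 2, 3), (2, 3, 4)], 10)

def Spec_min_edge_cover_triangles (graph_edges : List (Int × Int)) (triangles : List (Int × Int × Int)) (max_size : Int) (out : Int) : Prop := out = min_edge_cover_triangles_alt graph_edges triangles max_size
instance (graph_edges : List (Int × Int)) (triangles : List (Int × Int × Int)) (max_size : Int) (out : Int) : Decidable (Spec_min_edge_cover_triangles graph_edges triangles max_size out) := by unfold Spec_min_edge_cover_triangles; infer_instance

-- ===== CLAIM (what is proved, stated in full; the proofs are below) =====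
def Claim_equal_min_edge_cover_triangles : Prop := ∀ (graph_edges : List (Int × Int)) (triangles : List (Int × Int × Int)) (max_size : Int), Dom_min_edge_cover_triangles graph_edges triangles max_size → Pre_min_edge_cover_triangles graph_edges triangles max_size → Spec_min_edge_cover_triangles graph_edges triangles max_size (min_edge_cover_triangles graph_edges triangles max_size)

-- ===== LEMMAS AND PROOFS =====

def pvCov (tris : List (List (Int × Int))) (cover : List (Int × Int)) : Bool :=
  tris.all (fun t => t.any (fun e => cover.contains e))

def pvMin (tris : List (List (Int × Int))) (relevant cover : List (Int × Int)) : Nat :=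
  ((relevant.sublists.filter (fun S => pvCov tris (S ++ cover))).map List.length).foldl
    min relevant.length

theorem pvCov_mono {tris : List (List (Int × Int))} {c c' : List (Int × Int)}
    (h : pvCov tris c = true) (hsub : ∀ e, e ∈ c → e ∈ c') : pvCov tris c' = true := by
  simp only [pvCov, List.all_eq_true, List.any_eq_true, List.contains_iff_mem] at h ⊢
  intro t ht
  obtain ⟨e, he, hec⟩ := h t ht
  exact ⟨e, he, hsub e hec⟩

theorem pvMin_le {tris : List (List (Int × Int))} {relevant cover S : List (Int × Int)}
    (hS : S.Sublist relevant) (hcov : pvCov tris (S ++ cover) = true) :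
    pvMin tris relevant cover ≤ S.length := by
  have hmem : S.length ∈ ((relevant.sublists.filter (fun S => pvCov tris (S ++ cover))).map List.length) := by
    exact List.mem_map_of_mem (List.mem_filter.2 ⟨List.mem_sublists.2 hS, by simpa using hcov⟩)
  exact (PySem.List.foldl_min_le _ _).2 _ hmem

theorem pvMin_le_len (tris : List (List (Int × Int))) (relevant cover : List (Int × Int)) :
    pvMin tris relevant cover ≤ relevant.length :=
  (PySem.List.foldl_min_le _ _).1

theorem pvMin_exists {tris : List (List (Int × Int))} {relevant cover : List (Int × Int)}
    (hrel : pvCov tris (relevant ++ cover) = true) :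
    ∃ S, S.Sublist relevant ∧ pvCov tris (S ++ cover) = true ∧
      S.length = pvMin tris relevant cover := by
  rcases PySem.List.foldl_min_mem ((relevant.sublists.filter (fun S => pvCov tris (S ++ cover))).map List.length) relevant.length with h | h
  · exact ⟨relevant, List.Sublist.refl _, hrel, by rw [pvMin, h]⟩
  · obtain ⟨S, hSf, hlen⟩ := List.mem_map.1 h
    have := List.mem_filter.1 hSf
    exact ⟨S, List.mem_sublists.1 this.1, by simpa using this.2, hlen⟩

theorem pvMin_pos {tris : List (List (Int × Int))} {relevant cover : List (Int × Int)}
    {t : List (Int × Int)} (ht : t ∈ tris) (hu : t.any (fun e => cover.contains e) = false)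
    (hrel : pvCov tris (relevant ++ cover) = true) :
    1 ≤ pvMin tris relevant cover := by
  by_contra h
  have h0 : pvMin tris relevant cover = 0 := by omega
  obtain ⟨S, _, hcov, hlen⟩ := pvMin_exists hrel
  rw [h0] at hlen
  have : S = [] := List.length_eq_zero_iff.1 hlen
  subst this
  simp only [List.nil_append] at hcov
  simp only [pvCov, List.all_eq_true] at hcov
  rw [hcov t ht] at hu
  simp at hu

theorem pvMin_branch_le {tris : List (List (Int × Int))} {relevant cover : List (Int × Int)}
    {e : Int × Int} (hnd : relevant.Nodup) (he : e ∈ relevant)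
    (hrel : pvCov tris (relevant ++ cover) = true) :
    pvMin tris relevant cover ≤ pvMin tris relevant (cover ++ [e]) + 1 := by
  have hrel' : pvCov tris (relevant ++ (cover ++ [e])) = true :=
    pvCov_mono hrel (by intro x hx; simp at hx ⊢; tauto)
  obtain ⟨S, hS, hcov, hlen⟩ := pvMin_exists hrel'
  by_cases heS : e ∈ S
  · have : pvCov tris (S ++ cover) = true := by
      refine pvCov_mono hcov ?_
      intro x hx; simp at hx ⊢
      rcases hx with h | h | h
      · exact Or.inl h
      · exact Or.inr h
      · exact Or.inl (h ▸ heS)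
    calc pvMin tris relevant cover ≤ S.length := pvMin_le hS this
      _ ≤ _ := by omega
  · have hnodup : (e :: S).Nodup := by
      refine List.nodup_cons.2 ⟨heS, hS.nodup hnd⟩
    have hsubset : (e :: S) ⊆ relevant := by
      intro x hx; rcases List.mem_cons.1 hx with h | h
      · exact h ▸ he
      · exact hS.subset h
    obtain ⟨S₂, hperm, hS₂⟩ := (hnodup.subperm hsubset)
    have hcov₂ : pvCov tris (S₂ ++ cover) = true := by
      refine pvCov_mono hcov ?_
      intro x hx; simp at hx ⊢
      have hmem := hperm.mem_iff (a := x)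
      rcases hx with h | h | h
      · exact Or.inl (hmem.2 (by simp [h]))
      · exact Or.inr h
      · exact Or.inl (hmem.2 (by simp [h]))
    have := pvMin_le hS₂ hcov₂
    have hl2 : S₂.length = S.length + 1 := by
      rw [hperm.length_eq]; simp
    omega

theorem pvMin_branch_ge {tris : List (List (Int × Int))} {relevant cover : List (Int × Int)}
    {t : List (Int × Int)} (ht : t ∈ tris)
    (hu : t.any (fun e => cover.contains e) = false)
    (hrel : pvCov tris (relevant ++ cover) = true) :
    ∃ e ∈ t, pvMin tris relevant (cover ++ [e]) ≤ pvMin tris relevant cover - 1 := by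
  obtain ⟨S, hS, hcov, hlen⟩ := pvMin_exists hrel
  have hhit : ∃ e ∈ t, e ∈ S ++ cover := by
    simp only [pvCov, List.all_eq_true, List.any_eq_true, List.contains_iff_mem] at hcov
    exact hcov t ht
  obtain ⟨e, het, heSC⟩ := hhit
  have henc : e ∉ cover := by
    intro hc
    have : t.any (fun e => cover.contains e) = true := by
      simp only [List.any_eq_true, List.contains_iff_mem]; exact ⟨e, het, by simpa using hc⟩
    rw [this] at hu; simp at hu
  have heS : e ∈ S := by rcases List.mem_append.1 heSC with h | h; exact h; exact absurd h henc
  refine ⟨e, het, ?_⟩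
  have hsub : (S.erase e).Sublist relevant := (List.erase_sublist (l := S) (a := e)).trans hS
  have hcov' : pvCov tris (S.erase e ++ (cover ++ [e])) = true := by
    refine pvCov_mono hcov ?_
    intro x hx; simp at hx ⊢
    rcases hx with h | h
    · by_cases hxe : x = e
      · simp [hxe]
      · exact Or.inl (List.mem_erase_of_ne hxe |>.2 h)
    · simp [h]
  have := pvMin_le hsub hcov'
  have hle : (S.erase e).length = S.length - 1 := by
    rw [List.length_erase_of_mem heS]
  have hpos : 1 ≤ S.length := List.length_pos_of_mem heS
  omega

theorem pvCov_of_find?_none {tris : List (List (Int × Int))} {cover : PySem.Set (Int × Int)}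
    (hf : tris.find? (fun es => !es.any (fun e => PySem.Set.contains cover e)) = none) :
    pvCov tris cover = true := by
  have h := List.find?_eq_none.1 hf
  simp only [pvCov, List.all_eq_true]
  intro t ht
  have := h t ht
  simpa [PySem.Set.contains] using this

theorem pvMin_zero_of_cov {tris : List (List (Int × Int))} {relevant cover : List (Int × Int)}
    (h : pvCov tris cover = true) : pvMin tris relevant cover = 0 :=
  Nat.le_zero.1 (by simpa using pvMin_le (List.nil_sublist relevant) (by simpa using h))

theorem pvBB_eq (tris : List (List (Int × Int))) (relevant : List (Int × Int))
    (hnd : relevant.Nodup) (hsub : ∀ t ∈ tris, ∀ e ∈ t, e ∈ relevant)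
    (hhit : pvCov tris relevant = true) (hne : ∀ t ∈ tris, t ≠ []) :
    ∀ (budget : Nat) (cover : List (Int × Int)),
      pvBB tris budget cover = ((min (budget + 1) (pvMin tris relevant cover) : Nat) : Int) := by
  intro budget
  induction budget with
  | zero =>
    intro cover
    have hrel : pvCov tris (relevant ++ cover) = true :=
      pvCov_mono hhit (fun e he => List.mem_append_left _ he)
    cases hf : tris.find? (fun es => !es.any (fun e => PySem.Set.contains cover e)) with
    | none =>
      rw [pvBB, hf, pvMin_zero_of_cov (pvCov_of_find?_none hf)]; simp
    | some t =>
      have ht := List.mem_of_find?_eq_some hf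
      have hu : t.any (fun e => cover.contains e) = false := by
        have := List.find?_some hf; simpa [PySem.Set.contains] using this
      have hpos := pvMin_pos ht hu hrel
      have hm : min (0 + 1) (pvMin tris relevant cover) = 1 := by omega
      rw [pvBB, hf, hm]; rfl

  | succ b ih =>
    intro cover
    have hrel : pvCov tris (relevant ++ cover) = true :=
      pvCov_mono hhit (fun e he => List.mem_append_left _ he)
    cases hf : tris.find? (fun es => !es.any (fun e => PySem.Set.contains cover e)) with
    | none =>
      rw [pvBB, hf, pvMin_zero_of_cov (pvCov_of_find?_none hf)]; simp
    | some t =>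
      have ht := List.mem_of_find?_eq_some hf
      have hu : t.any (fun e => cover.contains e) = false := by
        have := List.find?_some hf; simpa [PySem.Set.contains] using this
      have hpos := pvMin_pos ht hu hrel
      cases t with
      | nil => exact absurd rfl (hne [] ht)
      | cons e ts =>
        rw [pvBB, hf]
        show 1 + List.foldl min (pvBB tris b (PySem.Set.add cover e))
              (List.map (fun e' => pvBB tris b (PySem.Set.add cover e')) ts) = _
        have hnotmem : ∀ e' ∈ e :: ts, e' ∉ cover := by
          intro e' he' hc
          have : (e :: ts).any (fun x => cover.contains x) = true := by
            simp only [List.any_eq_true, List.contains_iff_mem]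
            exact ⟨e', he', hc⟩
          rw [this] at hu; simp at hu
        have hadd : ∀ e' ∈ e :: ts, PySem.Set.add cover e' = cover ++ [e'] :=
          fun e' he' => PySem.Set.add_of_not_mem (hnotmem e' he')
        set g : (Int × Int) → Int :=
          fun e' => ((min (b + 1) (pvMin tris relevant (cover ++ [e'])) : Nat) : Int) with hgdef
        have hg : ∀ e' ∈ e :: ts, pvBB tris b (PySem.Set.add cover e') = g e' := by
          intro e' he'
          rw [hadd e' he', ih]
        rw [List.map_congr_left (fun a ha => hg a (List.mem_cons_of_mem e ha)),
            hg e (List.mem_cons_self)]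
        -- extremal facts about the fold
        have hmem := PySem.List.foldl_min_mem (ts.map g) (g e)
        have hle := PySem.List.foldl_min_le (ts.map g) (g e)
        set M := (ts.map g).foldl min (g e) with hM
        obtain ⟨estar, hestar, hMestar⟩ : ∃ e' ∈ e :: ts, M = g e' := by
          rcases hmem with h | h
          · exact ⟨e, List.mem_cons_self, h⟩
          · obtain ⟨e', he', hgE⟩ := List.mem_map.1 h
            exact ⟨e', List.mem_cons_of_mem e he', hgE.symm⟩
        have hMle : ∀ e' ∈ e :: ts, M ≤ g e' := by
          intro e' he'
          rcases List.mem_cons.1 he' with h | h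
          · exact h ▸ hle.1
          · exact hle.2 _ (List.mem_map_of_mem h)
        -- branch inequalities
        have hbl : ∀ e' ∈ e :: ts,
            pvMin tris relevant cover ≤ pvMin tris relevant (cover ++ [e']) + 1 :=
          fun e' he' => pvMin_branch_le hnd (hsub _ ht _ he') hrel
        obtain ⟨e0, he0, hbg⟩ := pvMin_branch_ge ht hu hrel
        have h1 := hMestar
        have h2 := hMle e0 he0
        have h3 := hbl estar hestar
        rw [hgdef] at h1 h2
        simp only at h1 h2
        omega

-- the Boolean cover condition of A's inner loop, membership form
theorem pvCond_eq (tris : List (List (Int × Int))) (S : List (Int × Int)) :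
    (tris.all (fun tes => !(PySem.Set.inter tes (PySem.Set.ofList S)).isEmpty))
      = pvCov tris S := by
  simp only [pvCov]
  congr 1
  funext tes
  rw [Bool.eq_iff_iff]
  simp [PySem.Set.inter, List.filter_eq_nil_iff, PySem.Set.contains,
    PySem.Set.mem_ofList, List.any_eq_true]

-- relevant as a map of its index range
theorem pvRelevant_map (relevant : List (Int × Int)) :
    (List.range relevant.length).map (fun k : Nat => PySem.List.pyGetD relevant (k : Int) (0, 0))
      = relevant := by
  have h := PySem.List.map_pyGetD_pyRange_zero relevant (0, 0)
  rw [PySem.List.len, PySem.List.pyRange_zero_natCast, List.map_map] at h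
  exact h

theorem pvOk_iff (tris : List (List (Int × Int))) (relevant : List (Int × Int)) (s : Int) :
    ((PySem.List.combinations (PySem.List.pyRange 0 (PySem.List.len relevant)) s.toNat).any
        (fun combo =>
          tris.all (fun tes =>
            !(PySem.Set.inter tes
              (PySem.Set.ofList (combo.map (fun i => PySem.List.pyGetD relevant i (0, 0))))).isEmpty)) = true) ↔
      ∃ S, S.Sublist relevant ∧ S.length = s.toNat ∧ pvCov tris S = true := by
  have hrange : PySem.List.pyRange 0 (PySem.List.len relevant)
      = (List.range relevant.length).map (fun k : Nat => (k : Int)) := by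
    rw [PySem.List.len, PySem.List.pyRange_zero_natCast]
  constructor
  · intro h
    obtain ⟨combo, hcombo, hcond⟩ := List.any_eq_true.1 h
    obtain ⟨hsl, hlen⟩ := (PySem.List.mem_combinations_iff _ _ _).1 hcombo
    rw [hrange] at hsl
    obtain ⟨c', hc', hceq⟩ := List.sublist_map_iff.1 hsl
    refine ⟨combo.map (fun i => PySem.List.pyGetD relevant i (0, 0)), ?_, by simp [hlen], ?_⟩
    · rw [hceq, List.map_map]
      have : c'.map ((fun i => PySem.List.pyGetD relevant i (0, 0)) ∘ (fun k : Nat => (k : Int)))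
          = c'.map (fun k : Nat => PySem.List.pyGetD relevant (k : Int) (0, 0)) := rfl
      rw [this]
      have hsub2 := List.Sublist.map (fun k : Nat => PySem.List.pyGetD relevant (k : Int) (0, 0)) hc'
      rwa [pvRelevant_map relevant] at hsub2
    · rw [← pvCond_eq]; exact hcond
  · rintro ⟨S, hS, hlen, hcov⟩
    rw [← pvRelevant_map relevant] at hS
    obtain ⟨c', hc', hSEq⟩ := List.sublist_map_iff.1 hS
    refine List.any_eq_true.2 ⟨c'.map (fun k : Nat => (k : Int)), ?_, ?_⟩
    · refine (PySem.List.mem_combinations_iff _ _ _).2 ⟨?_, ?_⟩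
      · rw [hrange]; exact List.Sublist.map _ hc'
      · rw [← hlen, hSEq]; simp
    · have : (c'.map (fun k : Nat => (k : Int))).map (fun i => PySem.List.pyGetD relevant i (0, 0)) = S := by
        rw [List.map_map, hSEq]; rfl
      rw [pvCond_eq, this]  -- careful: goal is the all-condition with combo substituted
      exact hcov

def pvOkA (relevant : List (Int × Int)) (tris : List (PySem.Set (Int × Int))) (s : Int) : Bool :=
  (PySem.List.combinations (PySem.List.pyRange 0 (PySem.List.len relevant)) s.toNat).any
    (fun combo =>
      tris.all (fun tes =>
        !(PySem.Set.inter tes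
          (PySem.Set.ofList (combo.map (fun i => PySem.List.pyGetD relevant i (0, 0))))).isEmpty))

-- pvBruteLoop's port body, phrased through pvOkA (definitionally equal)
theorem pvBruteLoop_cons (relevant : List (Int × Int)) (tris : List (PySem.Set (Int × Int)))
    (ms s : Int) (rest : List Int) :
    pvBruteLoop relevant tris ms (s :: rest)
      = if pvOkA relevant tris s then s else pvBruteLoop relevant tris ms rest := rfl

theorem pvOkA_iff (tris : List (PySem.Set (Int × Int))) (relevant : List (Int × Int)) (s : Int) :
    pvOkA relevant tris s = true ↔
      ∃ S, S.Sublist relevant ∧ S.length = s.toNat ∧ pvCov tris S = true :=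
  pvOk_iff tris relevant s

theorem pvBruteLoop_skip (relevant : List (Int × Int)) (tris : List (PySem.Set (Int × Int)))
    (ms : Int) (L : List Int) (h : ∀ s ∈ L, pvOkA relevant tris s = false) :
    pvBruteLoop relevant tris ms L = ms + 1 := by
  induction L with
  | nil => rfl
  | cons s rest ih =>
    rw [pvBruteLoop_cons, h s List.mem_cons_self]
    simp only [Bool.false_eq_true, if_false]
    exact ih (fun x hx => h x (List.mem_cons_of_mem _ hx))

theorem pvBruteLoop_append_skip (relevant : List (Int × Int)) (tris : List (PySem.Set (Int × Int)))
    (ms : Int) (L1 L2 : List Int) (h : ∀ s ∈ L1, pvOkA relevant tris s = false) :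
    pvBruteLoop relevant tris ms (L1 ++ L2) = pvBruteLoop relevant tris ms L2 := by
  induction L1 with
  | nil => rfl
  | cons s rest ih =>
    rw [List.cons_append, pvBruteLoop_cons, h s List.mem_cons_self]
    simp only [Bool.false_eq_true, if_false]
    exact ih (fun x hx => h x (List.mem_cons_of_mem _ hx))

theorem pvA_char (tris : List (PySem.Set (Int × Int))) (relevant : List (Int × Int)) (ms : Int)
    (hpos : 1 ≤ pvMin tris relevant []) (hrel : pvCov tris relevant = true) :
    pvBruteLoop relevant tris ms
        (PySem.List.pyRange 1 (min (ms + 1) ((relevant.length : Int) + 1)))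
      = if ((pvMin tris relevant [] : Int)) ≤ min ms (relevant.length : Int)
        then ((pvMin tris relevant [] : Nat) : Int) else ms + 1 := by
  set m := pvMin tris relevant [] with hm
  set n := relevant.length with hn
  have hmn : m ≤ n := pvMin_le_len tris relevant []
  have hnotok : ∀ s : Int, s < (m : Int) → pvOkA relevant tris s = false := by
    intro s hs
    by_contra hcontra
    have hok : pvOkA relevant tris s = true := by
      cases hx : pvOkA relevant tris s
      · exact absurd hx hcontra
      · rfl
    obtain ⟨S, hS, hlen, hcov⟩ := (pvOkA_iff tris relevant s).1 hok
    have := pvMin_le (cover := []) hS (by simpa using hcov)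
    rw [← hm] at this
    omega
  by_cases hcase : (m : Int) < min (ms + 1) ((n : Int) + 1)
  · have h1m : (1 : Int) ≤ (m : Int) := by exact_mod_cast hpos
    rw [PySem.List.pyRange_one_append 1 (m : Int) _ h1m (le_of_lt hcase)]
    rw [pvBruteLoop_append_skip _ _ _ _ _ (fun s hs => hnotok s (PySem.List.mem_pyRange_one.1 hs).2)]
    rw [PySem.List.pyRange_one_cons hcase, pvBruteLoop_cons]
    have hcondm : pvOkA relevant tris (m : Int) = true := by
      obtain ⟨S, hS, hcov, hlen⟩ := pvMin_exists (cover := []) (by simpa using hrel)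
      refine (pvOkA_iff tris relevant (m : Int)).2 ⟨S, hS, ?_, by simpa using hcov⟩
      rw [hlen, ← hm]; exact (Int.toNat_natCast m).symm
    rw [hcondm]
    simp only [if_true]
    rw [if_pos (by omega)]
  · rw [pvBruteLoop_skip _ _ _ _ (fun s hs => hnotok s (by
      have := PySem.List.mem_pyRange_one.1 hs; omega))]
    rw [if_neg (by omega)]

theorem pvUpdate_add (s u : PySem.Set (Int × Int)) (x : Int × Int) :
    PySem.Set.update s (PySem.Set.add u x) = PySem.Set.add (PySem.Set.update s u) x := by
  by_cases hx : x ∈ u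
  · rw [PySem.Set.add_of_mem hx]
    have hx' : x ∈ PySem.Set.update s u :=
      (PySem.Set.mem_foldl_add u id s x).2 (Or.inr ⟨x, hx, rfl⟩)
    rw [PySem.Set.add_of_mem hx']
  · rw [PySem.Set.add_of_not_mem hx]
    show List.foldl PySem.Set.add s (u ++ [x]) = _
    rw [List.foldl_append]
    rfl

theorem pvUpdate_foldl_add (xs : List (Int × Int)) :
    ∀ (u s : PySem.Set (Int × Int)),
      PySem.Set.update s (xs.foldl PySem.Set.add u) = PySem.Set.update (PySem.Set.update s u) xs := by
  induction xs with
  | nil => intro u s; rfl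
  | cons x xs ih =>
    intro u s
    show PySem.Set.update s ((xs.foldl PySem.Set.add (PySem.Set.add u x))) = _
    rw [ih]
    rw [pvUpdate_add]
    rfl

theorem pvUpdate_ofList (s : PySem.Set (Int × Int)) (xs : List (Int × Int)) :
    PySem.Set.update s (PySem.Set.ofList xs) = PySem.Set.update s xs := by
  rw [PySem.Set.ofList_eq_foldl, pvUpdate_foldl_add]
  rfl

theorem pvEdges_eq (t : Int × Int × Int) :
    pvEdgesOfTuple t = PySem.Set.ofList (pvTriRaw t) := rfl

theorem pvFoldUpdate (ts : List (Int × Int × Int)) :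
    ∀ s : PySem.Set (Int × Int),
      ts.foldl (fun s2 t => PySem.Set.update s2 (pvTriRaw t)) s
        = (ts.flatMap pvTriRaw).foldl PySem.Set.add s := by
  induction ts with
  | nil => intro s; rfl
  | cons t ts ih =>
    intro s
    rw [List.foldl_cons, ih, List.flatMap_cons, List.foldl_append]
    rfl

theorem pvRelevantA_eq (triangles : List (Int × Int × Int)) :
    (triangles.map pvEdgesOfTuple).foldl (fun acc tes => PySem.Set.union acc tes)
        ([] : PySem.Set (Int × Int))
      = PySem.Set.ofList (triangles.flatMap pvTriRaw) := by
  rw [List.foldl_map]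
  have hstep : ∀ (acc : PySem.Set (Int × Int)) (t : Int × Int × Int),
      PySem.Set.union acc (pvEdgesOfTuple t) = PySem.Set.update acc (pvTriRaw t) := by
    intro acc t
    rw [pvEdges_eq]
    show PySem.Set.update acc (PySem.Set.ofList (pvTriRaw t)) = _
    exact pvUpdate_ofList acc (pvTriRaw t)
  rw [show List.foldl (fun acc t => PySem.Set.union acc (pvEdgesOfTuple t))
        ([] : PySem.Set (Int × Int)) triangles
      = List.foldl (fun s2 t => PySem.Set.update s2 (pvTriRaw t)) [] triangles
    from PySem.List.foldl_congr_mem _ _ _ _ (fun acc t _ => hstep acc t)]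
  rw [pvFoldUpdate, ← PySem.Set.ofList_eq_foldl]

theorem pvBuild_eq (triangles : List (Int × Int × Int)) :
    pvBuild triangles
      = (triangles.map (fun t => PySem.Set.ofList (pvTriRaw t)),
         PySem.Set.ofList (triangles.flatMap pvTriRaw)) := by
  rw [pvBuild]
  have hstep : (fun (s : List (List (Int × Int)) × List (Int × Int)) t =>
      let q := (pvTriRaw t).foldl (fun (q : List (Int × Int) × List (Int × Int)) e =>
          (if e ∈ q.1 then q.1 else q.1 ++ [e],
           if e ∈ q.2 then q.2 else q.2 ++ [e])) ([], s.2)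
      (s.1 ++ [q.1], q.2))
      = (fun s t => (s.1 ++ [PySem.Set.ofList (pvTriRaw t)], PySem.Set.update s.2 (pvTriRaw t))) := by
    funext s t
    have hq : (fun (q : List (Int × Int) × List (Int × Int)) (e : Int × Int) =>
        (if e ∈ q.1 then q.1 else q.1 ++ [e], if e ∈ q.2 then q.2 else q.2 ++ [e]))
        = (fun q e => (PySem.Set.add q.1 e, PySem.Set.add q.2 e)) := by
      funext q e
      rw [PySem.Set.add_eq_ite, PySem.Set.add_eq_ite]
    show (_, _) = (_, _)
    rw [hq, PySem.List.foldl_prod_mk PySem.Set.add PySem.Set.add]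
    rw [← PySem.Set.ofList_eq_foldl]
    rfl
  rw [hstep]
  rw [PySem.List.foldl_prod_mk (f := fun l t => l ++ [PySem.Set.ofList (pvTriRaw t)])
      (g := fun s2 t => PySem.Set.update s2 (pvTriRaw t))]
  rw [PySem.List.foldl_append_singleton_eq_map, List.nil_append,
      pvFoldUpdate, ← PySem.Set.ofList_eq_foldl]

theorem pvDistinct_eq (triangles : List (Int × Int × Int)) :
    pvDistinct triangles = (PySem.Set.ofList (triangles.flatMap pvTriRaw)).length := rfl

-- ===== VERDICT (by name: the statement is the Claim_ definition above) =====
theorem min_edge_cover_triangles_spec : Claim_equal_min_edge_cover_triangles := by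
  intro ges triangles ms _hdom hpre
  show min_edge_cover_triangles ges triangles ms = min_edge_cover_triangles_alt ges triangles ms
  cases triangles with
  | nil => rfl
  | cons t0 rest =>
    have hpre' : pvDistinct (t0 :: rest) ≤ 25 := hpre
    rw [pvDistinct_eq] at hpre'
    rw [min_edge_cover_triangles, min_edge_cover_triangles_alt, pvBuild_eq]
    simp only [List.isEmpty_cons, Bool.false_eq_true, if_false]
    rw [show List.map (fun t => PySem.Set.ofList (pvTriRaw t)) (t0 :: rest)
          = List.map pvEdgesOfTuple (t0 :: rest) from rfl]
    rw [pvRelevantA_eq]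
    set T := List.map pvEdgesOfTuple (t0 :: rest) with hT
    set R := PySem.Set.ofList ((t0 :: rest).flatMap pvTriRaw) with hR
    have hnd : R.Nodup := PySem.Set.nodup_ofList _
    have hsub : ∀ t ∈ T, ∀ e ∈ t, e ∈ R := by
      intro t ht e he
      obtain ⟨x, hx, hxe⟩ := List.mem_map.1 ht
      rw [← hxe] at he
      have he' : e ∈ pvTriRaw x := (PySem.Set.mem_ofList _ _).1 he
      exact (PySem.Set.mem_ofList _ _).2 (List.mem_flatMap.2 ⟨x, hx, he'⟩)
    have hne : ∀ t ∈ T, t ≠ [] := by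
      intro t ht
      obtain ⟨x, hx, hxe⟩ := List.mem_map.1 ht
      rw [← hxe]
      exact List.ne_nil_of_mem ((PySem.Set.mem_ofList _ (pvNorm x.1 x.2.1)).2 (by simp))
    have hhit : pvCov T R = true := by
      simp only [pvCov, List.all_eq_true, List.any_eq_true, List.contains_iff_mem]
      intro t ht
      obtain ⟨x, hx, hxe⟩ := List.mem_map.1 ht
      refine ⟨pvFs x.1 x.2.1, ?_, ?_⟩
      · rw [← hxe]; exact (PySem.Set.mem_ofList _ _).2 (by simp [pvFs, pvNorm])
      · exact (PySem.Set.mem_ofList _ _).2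
          (List.mem_flatMap.2 ⟨x, hx, by simp [pvTriRaw]⟩)
    have hpos : 1 ≤ pvMin T R [] := by
      refine pvMin_pos (t := pvEdgesOfTuple t0) (by simp [hT]) (by simp) ?_
      simpa using hhit
    have hmn : pvMin T R [] ≤ R.length := pvMin_le_len T R []
    have h25 : ¬ ((R.length : Int) > 25) := by omega
    rw [if_neg h25, if_neg h25]
    rw [pvA_char T R ms hpos hhit,
        pvBB_eq T R hnd hsub hhit hne (min ms (R.length : Int)).toNat []]
    split_ifs <;> omega
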